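-- pv_equiv track=rewrite | github.com/Amathlog/projectEuler | Problem11/solution.py | genereate_right_diag_coordinates
-- ===== SOURCE A (Python) =====
-- def genereate_right_diag_coordinates(s):
--     x_start = len(s) - 1
--     y_start = 0
--     res = []
--     while y_start < len(s[0]):
--         x = x_start
--         y = y_start
--         res.append([])
--         while x < len(s) and y < len(s[0]):
--             res[-1].append((x,y))
--             x += 1
--             y += 1
--         if x_start != 0:
--             x_start -= 1
--         else:
--             y_start += 1
--     return res
-- ===== SOURCE B (Python) =====
-- def genereate_right_diag_coordinates(s):
--     rows, cols = len(s), len(s[0])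
--     diags = {}
--     for x in range(rows):
--         for y in range(cols):
--             diags.setdefault(x - y, []).append((x, y))
--     return [diags[k] for k in sorted(diags, reverse=True)]
-- ===== Notes on version B (the rewrite author's own statement) =====
-- stated objective: alternative
-- what changed: Replaces A's explicit two-pointer diagonal walk (mutable x_start/y_start, nested whiles) by a group-by data structure: one pass over all cells builds a dict keyed by the diagonal invariant x-y, then the diagonals are emitted by sorting the keys in descending order.
import Mathlib
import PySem

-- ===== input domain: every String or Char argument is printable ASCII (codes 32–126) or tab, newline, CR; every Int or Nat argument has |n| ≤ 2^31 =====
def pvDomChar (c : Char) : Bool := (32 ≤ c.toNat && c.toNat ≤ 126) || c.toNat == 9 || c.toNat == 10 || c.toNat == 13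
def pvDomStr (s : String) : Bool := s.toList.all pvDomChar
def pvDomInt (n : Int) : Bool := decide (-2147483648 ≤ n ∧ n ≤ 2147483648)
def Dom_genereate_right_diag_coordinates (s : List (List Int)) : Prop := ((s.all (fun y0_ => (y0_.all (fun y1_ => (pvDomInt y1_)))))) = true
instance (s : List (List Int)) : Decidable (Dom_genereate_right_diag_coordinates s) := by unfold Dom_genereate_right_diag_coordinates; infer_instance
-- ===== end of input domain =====

-- B replaces A's two-pointer diagonal walk by a group-by dict keyed by x-y plus a descending key sort; equivalence of RETURN values on nonempty s (A raises IndexError on s = []).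

-- ===== PORT A =====
-- inner while loop: collect (x,y) while x < rows and y < cols
def pvInnerA (rows cols x y : Int) : List (Int × Int) :=
  if h : x < rows ∧ y < cols then (x, y) :: pvInnerA rows cols (x + 1) (y + 1) else []
termination_by (rows - x).toNat
decreasing_by omega

-- outer while loop over (x_start, y_start); x_start/y_start are the nonnegative counters Python maintains
def pvOuterA (rows cols : Int) (xs ys : Nat) : List (List (Int × Int)) :=
  if h : (ys : Int) < cols then
    pvInnerA rows cols xs ys ::
      (if xs ≠ 0 then pvOuterA rows cols (xs - 1) ys
       else pvOuterA rows cols xs (ys + 1))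
  else []
termination_by xs + (cols - (ys : Int)).toNat
decreasing_by
  · omega
  · omega

def genereate_right_diag_coordinates (s : List (List Int)) : List (List (Int × Int)) :=
  match s with
  | [] => []  -- Python raises IndexError here (outside Pre_)
  | r0 :: _ => pvOuterA (s.length : Int) (r0.length : Int) (s.length - 1) 0

-- ===== PORT B =====
-- for x in range(rows): for y in range(cols): diags.setdefault(x - y, []).append((x, y))
-- then [diags[k] for k in sorted(diags, reverse=True)]
def genereate_right_diag_coordinates_alt (s : List (List Int)) : List (List (Int × Int)) :=
  match s with
  | [] => []  -- Python raises IndexError here (outside Pre_)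
  | r0 :: rest =>
    let rows : Int := ((r0 :: rest).length : Int)
    let cols : Int := (r0.length : Int)
    let diags : PySem.Dict Int (List (Int × Int)) :=
      (PySem.List.pyRange 0 rows 1).foldl
        (fun d x =>
          (PySem.List.pyRange 0 cols 1).foldl
            (fun d y => d.modify (x - y) [] (fun v => v ++ [(x, y)])) d)
        PySem.Dict.empty
    (PySem.List.sorted diags.keys (fun k => k) true).map (fun k => diags.getD k [])

-- ===== PRECONDITION & SPEC =====
-- Pre_ excludes only the empty list, on which Python A raises IndexError at s[0].
def Pre_genereate_right_diag_coordinates (s : List (List Int)) : Prop := s ≠ []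
instance (s : List (List Int)) : Decidable (Pre_genereate_right_diag_coordinates s) := by unfold Pre_genereate_right_diag_coordinates; infer_instance
def pvWitness_genereate_right_diag_coordinates : List (List Int) := [[1, 2], [3, 4], [5, 6]]

def Spec_genereate_right_diag_coordinates (s : List (List Int)) (out : List (List (Int × Int))) : Prop := out = genereate_right_diag_coordinates_alt s
instance (s : List (List Int)) (out : List (List (Int × Int))) : Decidable (Spec_genereate_right_diag_coordinates s out) := by unfold Spec_genereate_right_diag_coordinates; infer_instance

-- ===== CLAIM (what is proved, stated in full; the proofs are below) =====
def Claim_equal_genereate_right_diag_coordinates : Prop := ∀ (s : List (List Int)), Dom_genereate_right_diag_coordinates s → Pre_genereate_right_diag_coordinates s → Spec_genereate_right_diag_coordinates s (genereate_right_diag_coordinates s)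

-- ===== LEMMAS AND PROOFS =====

-- one anti-diagonal, keyed by the invariant k = x - y (common closed form of both programs)
def pvDiagB (rows cols k : Int) : List (Int × Int) :=
  (PySem.List.pyRange (max k 0) (min rows (cols + k)) 1).map (fun x => (x, x - k))

-- the flattened grid of (key, cell) pairs B's nested loop processes
def pvPairs (rows cols : Int) : List (Int × (Int × Int)) :=
  (PySem.List.pyRange 0 rows 1).flatMap
    (fun x => (PySem.List.pyRange 0 cols 1).map (fun y => (x - y, (x, y))))

-- ---- A-side: closed form of the pointer walk ----

theorem pvInnerA_eq (rows cols : Int) : ∀ (x y : Int),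
    pvInnerA rows cols x y
      = (PySem.List.pyRange x (min rows (cols + x - y)) 1).map (fun t => (t, t - (x - y))) := by
  intro x y
  fun_induction pvInnerA rows cols x y with
  | case1 x y h ih =>
    rw [PySem.List.pyRange_one_cons (by omega : x < min rows (cols + x - y))]
    have e1 : x + 1 - (y + 1) = x - y := by ring
    have e2 : cols + (x + 1) - (y + 1) = cols + x - y := by ring
    simp only [List.map_cons, ih, e1, e2]
    congr 2
    omega
  | case2 x y h =>
    rw [PySem.List.pyRange_one_eq_nil (by omega)]
    simp

theorem pvDiagB_nonneg (rows cols k : Int) (hk : 0 ≤ k) :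
    pvDiagB rows cols k = pvInnerA rows cols k 0 := by
  rw [pvInnerA_eq, pvDiagB]
  have h1 : max k 0 = k := by omega
  have h2 : cols + k - 0 = cols + k := by ring
  rw [h1, h2]
  congr 1
  funext t
  simp

theorem pvDiagB_nonpos (rows cols : Int) (y : Nat) :
    pvDiagB rows cols (-(y : Int)) = pvInnerA rows cols 0 y := by
  rw [pvInnerA_eq, pvDiagB]
  have h1 : max (-(y : Int)) 0 = 0 := by omega
  have h2 : cols + 0 - (y : Int) = cols + -(y : Int) := by ring
  rw [h1, h2]
  congr 1
  funext t
  simp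

-- phase 2 of A's outer loop: x_start = 0, y_start climbs
theorem pvOuterA_zero (rows cols : Int) : ∀ (ys : Nat),
    pvOuterA rows cols 0 ys
      = (PySem.List.pyRange (-(ys : Int)) (-cols) (-1)).map (fun k => pvDiagB rows cols k) := by
  have main : ∀ (n : Nat) (ys : Nat), (cols - (ys : Int)).toNat = n →
      pvOuterA rows cols 0 ys
        = (PySem.List.pyRange (-(ys : Int)) (-cols) (-1)).map (fun k => pvDiagB rows cols k) := by
    intro n
    induction n with
    | zero =>
      intro ys hn
      rw [pvOuterA, dif_neg (by omega), PySem.List.pyRange_neg_one_eq_nil (by omega)]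
      simp
    | succ m ih =>
      intro ys hn
      rw [pvOuterA, dif_pos (by omega), if_neg (by simp)]
      rw [PySem.List.pyRange_neg_one_cons (by omega : -cols < -(ys : Int))]
      simp only [List.map_cons]
      have h3 : (-(((ys + 1 : Nat)) : Int)) = -(ys : Int) - 1 := by push_cast; omega
      rw [pvDiagB_nonpos, ih (ys + 1) (by push_cast; omega), h3]
      norm_num
  intro ys
  exact main _ ys rfl

-- phase 1 of A's outer loop: y_start = 0, x_start descends
theorem pvOuterA_xs (rows cols : Int) (hc : 0 < cols) : ∀ (xs : Nat),
    pvOuterA rows cols xs 0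
      = (PySem.List.pyRange (xs : Int) (-cols) (-1)).map (fun k => pvDiagB rows cols k) := by
  intro xs
  induction xs with
  | zero =>
    rw [pvOuterA]
    simp only [Nat.cast_zero, hc, dite_true]
    rw [if_neg (by simp), pvOuterA_zero rows cols 1]
    rw [PySem.List.pyRange_neg_one_cons (by omega : -cols < (0 : Int))]
    simp only [List.map_cons]
    rw [pvDiagB_nonneg rows cols 0 le_rfl]
    norm_num
  | succ n ih =>
    rw [pvOuterA]
    simp only [Nat.cast_zero, hc, dite_true]
    rw [if_pos (by omega), Nat.add_sub_cancel, ih]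
    rw [PySem.List.pyRange_neg_one_cons (by push_cast; omega : -cols < ((n + 1 : Nat) : Int))]
    simp only [List.map_cons]
    rw [pvDiagB_nonneg rows cols ((n + 1 : Nat) : Int) (by push_cast; omega)]
    push_cast
    rw [add_sub_cancel_right]

-- ---- B-side: the dict characterisation ----

-- a nested foldl is the foldl over the flattened list
theorem pvFoldlNested {α β γ : Type} (l : List α) (g : α → List β) (f : γ → β → γ) :
    ∀ (init : γ),
      l.foldl (fun acc x => (g x).foldl f acc) init = (l.flatMap g).foldl f init := by
  induction l with
  | nil => intro init; simp
  | cons a t ih => intro init; simp [List.flatMap_cons, List.foldl_append, ih]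

-- filtering an increasing unit range by "c - y == k" leaves at most the point c - k
theorem pvFilterRange (c k : Int) : ∀ (a b : Int),
    (PySem.List.pyRange a b 1).filter (fun y => c - y == k)
      = if a ≤ c - k ∧ c - k < b then [c - k] else [] := by
  have main : ∀ (n : Nat) (a b : Int), (b - a).toNat = n →
      (PySem.List.pyRange a b 1).filter (fun y => c - y == k)
        = if a ≤ c - k ∧ c - k < b then [c - k] else [] := by
    intro n
    induction n with
    | zero =>
      intro a b hn
      rw [PySem.List.pyRange_one_eq_nil (by omega), if_neg (by omega)]
      simp
    | succ m ih =>
      intro a b hn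
      rw [PySem.List.pyRange_one_cons (by omega : a < b), List.filter_cons,
        ih (a + 1) b (by omega)]
      by_cases hk : c - a = k
      · simp only [show (c - a == k) = true by simpa using hk]
        rw [if_neg (show ¬(a + 1 ≤ c - k ∧ c - k < b) by omega),
          if_pos (show a ≤ c - k ∧ c - k < b by omega)]
        simp [show c - k = a by omega]
      · simp only [show (c - a == k) = false by simpa using hk]
        by_cases hin : a ≤ c - k ∧ c - k < b
        · rw [if_pos (show a + 1 ≤ c - k ∧ c - k < b by omega), if_pos hin]
          simp
        · rw [if_neg (show ¬(a + 1 ≤ c - k ∧ c - k < b) by omega), if_neg hin]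
          simp
  intro a b
  exact main _ a b rfl

-- flatMapping an if-singleton over a unit range is a map over the clipped range
theorem pvFlatMapIf {α : Type} (lo hi : Int) (g : Int → α) : ∀ (a b : Int),
    (PySem.List.pyRange a b 1).flatMap
        (fun x => if lo ≤ x ∧ x < hi then [g x] else [])
      = (PySem.List.pyRange (max a lo) (min b hi) 1).map g := by
  have main : ∀ (n : Nat) (a b : Int), (b - a).toNat = n →
      (PySem.List.pyRange a b 1).flatMap
          (fun x => if lo ≤ x ∧ x < hi then [g x] else [])
        = (PySem.List.pyRange (max a lo) (min b hi) 1).map g := by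
    intro n
    induction n with
    | zero =>
      intro a b hn
      rw [PySem.List.pyRange_one_eq_nil (by omega : b ≤ a),
        PySem.List.pyRange_one_eq_nil (by omega : min b hi ≤ max a lo)]
      simp
    | succ m ih =>
      intro a b hn
      rw [PySem.List.pyRange_one_cons (by omega : a < b), List.flatMap_cons,
        ih (a + 1) b (by omega)]
      by_cases hcond : lo ≤ a ∧ a < hi
      · rw [if_pos hcond,
          show max a lo = a by omega,
          PySem.List.pyRange_one_cons (by omega : a < min b hi),
          show max (a + 1) lo = a + 1 by omega]
        simp
      · rw [if_neg hcond]
        simp only [List.nil_append]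
        by_cases hlo : a < lo
        · rw [show max a lo = lo by omega, show max (a + 1) lo = lo by omega]
        · rw [PySem.List.pyRange_one_eq_nil (by omega : min b hi ≤ max a lo),
            PySem.List.pyRange_one_eq_nil (by omega : min b hi ≤ max (a + 1) lo)]
  intro a b
  exact main _ a b rfl

-- the group of key k in the flattened grid is exactly the diagonal k
theorem pvPairs_filter (rows cols k : Int) :
    ((pvPairs rows cols).filter (fun p => p.1 == k)).map (fun p => p.2)
      = pvDiagB rows cols k := by
  unfold pvPairs pvDiagB
  rw [List.filter_flatMap, List.map_flatMap]
  have hx : ∀ x : Int,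
      ((((PySem.List.pyRange 0 cols 1).map (fun y => (x - y, (x, y)))).filter
          (fun p => p.1 == k)).map (fun p => p.2))
        = if k ≤ x ∧ x < cols + k then [(x, x - k)] else [] := by
    intro x
    rw [List.filter_map, List.map_map]
    rw [show ((fun p : Int × (Int × Int) => p.1 == k) ∘ fun y => (x - y, (x, y)))
        = (fun y => x - y == k) from rfl]
    rw [pvFilterRange x k 0 cols]
    by_cases h : (0 : Int) ≤ x - k ∧ x - k < cols
    · rw [if_pos h, if_pos (by omega)]
      simp
    · rw [if_neg h, if_neg (by omega)]
      simp
  calc ((PySem.List.pyRange 0 rows 1).flatMap fun x =>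
          ((((PySem.List.pyRange 0 cols 1).map (fun y => (x - y, (x, y)))).filter
            (fun p => p.1 == k)).map (fun p => p.2)))
      = (PySem.List.pyRange 0 rows 1).flatMap
          (fun x => if k ≤ x ∧ x < cols + k then [(x, x - k)] else []) := by
        exact List.flatMap_congr (fun x _ => hx x)
    _ = (PySem.List.pyRange (max 0 k) (min rows (cols + k)) 1).map (fun x => (x, x - k)) :=
        pvFlatMapIf k (cols + k) (fun x => (x, x - k)) 0 rows
    _ = (PySem.List.pyRange (max k 0) (min rows (cols + k)) 1).map (fun x => (x, x - k)) := by
        rw [max_comm]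

-- keys of the grid: exactly the interval of diagonal invariants
theorem pvKeysMem (rows cols k : Int) (hr : 1 ≤ rows) (hc : 1 ≤ cols) :
    k ∈ (pvPairs rows cols).map (fun p => p.1) ↔ -cols < k ∧ k ≤ rows - 1 := by
  unfold pvPairs
  simp only [List.map_flatMap, List.map_map, List.mem_flatMap, List.mem_map,
    Function.comp_apply, PySem.List.mem_pyRange_one]
  constructor
  · rintro ⟨x, hx, y, hy, h⟩
    omega
  · intro hk
    exact ⟨max k 0, by omega, max k 0 - k, by omega, by omega⟩

theorem pvDict_keys (rows cols : Int) :
    ((pvPairs rows cols).foldl (fun d p => d.modify p.1 [] (fun v => v ++ [p.2]))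
        (PySem.Dict.empty : PySem.Dict Int (List (Int × Int)))).keys
      = PySem.Set.ofList ((pvPairs rows cols).map (fun p => p.1)) := by
  rw [PySem.Dict.keys_foldl_modify_key]
  rfl

theorem pvDict_getD (rows cols k : Int) :
    ((pvPairs rows cols).foldl (fun d p => d.modify p.1 [] (fun v => v ++ [p.2]))
        (PySem.Dict.empty : PySem.Dict Int (List (Int × Int)))).getD k []
      = pvDiagB rows cols k := by
  rw [PySem.Dict.getD_foldl_modify_append, PySem.Dict.getD_empty, List.nil_append,
    pvPairs_filter]

theorem pvSortedKeys (rows cols : Int) (hr : 1 ≤ rows) (hc : 1 ≤ cols) :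
    PySem.List.sorted (PySem.Set.ofList ((pvPairs rows cols).map (fun p => p.1)))
        (fun k => k) true
      = PySem.List.pyRange (rows - 1) (-cols) (-1) := by
  apply PySem.List.sorted_rev_eq_of_perm_of_pairwise_gt
  · refine (List.perm_ext_iff_of_nodup ?_ ?_).mpr ?_
    · rw [PySem.List.pyRange_neg_one_eq_reverse]
      exact List.nodup_reverse.mpr (PySem.List.nodup_pyRange_one _ _)
    · exact PySem.Set.nodup_ofList _
    · intro x
      rw [PySem.List.mem_pyRange_neg_one, PySem.Set.mem_ofList,
        pvKeysMem rows cols x hr hc]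
  · rw [PySem.List.pyRange_neg_one_eq_reverse, List.pairwise_reverse]
    exact PySem.List.pairwise_lt_pyRange_one _ _

-- ===== VERDICT (by name: the statement is the Claim_ definition above) =====
theorem genereate_right_diag_coordinates_spec : Claim_equal_genereate_right_diag_coordinates := by
  intro s _ hpre
  unfold Spec_genereate_right_diag_coordinates
  match s with
  | [] => exact absurd rfl hpre
  | r0 :: rest =>
    simp only [genereate_right_diag_coordinates, genereate_right_diag_coordinates_alt]
    by_cases hc : (r0.length : Int) = 0
    · have h0 : PySem.List.pyRange 0 (r0.length : Int) 1 = [] := by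
        rw [hc]; exact PySem.List.pyRange_one_eq_nil le_rfl
      rw [pvOuterA, dif_neg (by omega)]
      simp [h0, List.foldl_fixed]
    · have hfold :
          (PySem.List.pyRange 0 (((r0 :: rest).length : Nat) : Int) 1).foldl
              (fun d x =>
                (PySem.List.pyRange 0 ((r0.length : Nat) : Int) 1).foldl
                  (fun d y => d.modify (x - y) [] (fun v => v ++ [(x, y)])) d)
              (PySem.Dict.empty : PySem.Dict Int (List (Int × Int)))
            = (pvPairs ((r0 :: rest).length : Int) (r0.length : Int)).foldl
                (fun d p => d.modify p.1 [] (fun v => v ++ [p.2])) PySem.Dict.empty := by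
        rw [pvPairs, ← pvFoldlNested]
        congr 1
        funext d x
        rw [List.foldl_map]
      rw [pvOuterA_xs _ _ (by omega), hfold, pvDict_keys,
        pvSortedKeys _ _ (by simp) (by omega)]
      have hcast : ((((r0 :: rest).length - 1 : Nat)) : Int) = ((r0 :: rest).length : Int) - 1 := by
        simp
      rw [hcast]
      exact List.map_congr_left (fun k _ => (pvDict_getD _ _ k).symm)
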